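-- pv_equiv track=rewrite | github.com/lduncan1712/__ForMap_Copy | updated_ts.py | get_connecting_perspectives
-- ===== SOURCE A (Python) =====
-- def get_connecting_perspectives(perspections, length):
--
--     list_to_add = []
--
--     for index in range(0, length):
--         start = []
--         end = []
--         for perspective in perspections:
--             # INDEX, ______
--             if perspective[0] == index:
--                 end.append(perspective[1])
--
--             # _____, INDEX
--             elif perspective[1] == index:
--                 start.append(perspective[0])
--             else:
--                 continue
--
--         if len(start) != 0 and len(end) != 0:
--
--             for start_option in start:
--                 for end_option in end:
--
--                     val = (start_option, end_option)
--
--                     if val in perspections: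
--                         continue
--                     else:
--                         list_to_add.append(val)
--
--     for val in list_to_add:
--         perspections.append(val)
--
--     return perspections
-- ===== SOURCE B (Python) =====
-- def get_connecting_perspectives(perspections, length):
--     # Group endpoints once: ends[a] = successors of a, starts[b] = predecessors of b.
--     ends = {}
--     starts = {}
--     for a, b in perspections:
--         ends.setdefault(a, []).append(b)
--         if a != b:
--             starts.setdefault(b, []).append(a)
--     existing = set(perspections)
--     added = []
--     for index in range(length):
--         for s in starts.get(index, []):
--             for e in ends.get(index, []):
--                 if (s, e) not in existing:
--                     added.append((s, e))
--     perspections.extend(added)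
--     return perspections
-- ===== Notes on version B (the rewrite author's own statement) =====
-- stated objective: faster
-- what changed: B builds the per-index start/end lists once in a single grouping pass over perspections (two dicts) and uses a set for the membership test, instead of rescanning all of perspections for every index and doing a linear 'in list' check per candidate pair.
import Mathlib
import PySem

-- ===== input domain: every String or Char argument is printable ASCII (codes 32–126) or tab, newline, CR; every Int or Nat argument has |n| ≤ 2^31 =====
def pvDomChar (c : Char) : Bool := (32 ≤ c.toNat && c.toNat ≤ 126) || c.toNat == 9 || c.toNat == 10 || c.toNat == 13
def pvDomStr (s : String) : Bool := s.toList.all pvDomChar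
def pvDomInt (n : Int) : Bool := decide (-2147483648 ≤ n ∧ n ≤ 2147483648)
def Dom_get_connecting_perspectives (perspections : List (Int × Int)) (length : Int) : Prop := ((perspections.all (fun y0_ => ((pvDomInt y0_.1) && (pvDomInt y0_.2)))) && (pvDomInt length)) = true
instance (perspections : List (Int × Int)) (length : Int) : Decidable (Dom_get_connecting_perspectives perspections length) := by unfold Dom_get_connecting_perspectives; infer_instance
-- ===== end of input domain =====

-- B replaces A's per-index rescans of perspections and linear list membership by one grouping
-- pass into two dicts plus a set (objective: faster). Both A and B mutate `perspections` in
-- Python by appending the new pairs; the equivalence proved here is about the return value.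


-- ===== PORT A =====
def get_connecting_perspectives (perspections : List (Int × Int)) (length : Int) : List (Int × Int) :=
  let list_to_add :=
    (PySem.List.pyRange 0 length 1).foldl (fun list_to_add index =>
      let se := perspections.foldl (fun (se : List Int × List Int) perspective =>
        if perspective.1 == index then (se.1, se.2 ++ [perspective.2])
        else if perspective.2 == index then (se.1 ++ [perspective.1], se.2)
        else se) ([], [])
      if se.1.length ≠ 0 ∧ se.2.length ≠ 0 then
        se.1.foldl (fun acc start_option =>
          se.2.foldl (fun acc end_option =>
            if (start_option, end_option) ∈ perspections then acc
            else acc ++ [(start_option, end_option)]) acc) list_to_add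
      else list_to_add) []
  perspections ++ list_to_add

-- ===== PORT B =====
def get_connecting_perspectives_alt (perspections : List (Int × Int)) (length : Int) : List (Int × Int) :=
  let dicts := perspections.foldl
    (fun (d : PySem.Dict Int (List Int) × PySem.Dict Int (List Int)) p =>
      (d.1.modify p.1 [] (fun l => l ++ [p.2]),
       if p.1 ≠ p.2 then d.2.modify p.2 [] (fun l => l ++ [p.1]) else d.2))
    (PySem.Dict.empty, PySem.Dict.empty)
  let ends := dicts.1
  let starts := dicts.2
  let existing : PySem.Set (Int × Int) := PySem.Set.ofList perspections
  let added := (PySem.List.pyRange 0 length 1).foldl (fun added index =>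
    (starts.getD index []).foldl (fun acc s =>
      (ends.getD index []).foldl (fun acc e =>
        if PySem.Set.contains existing (s, e) then acc else acc ++ [(s, e)]) acc) added) []
  perspections ++ added

-- ===== PRECONDITION & SPEC =====
def Spec_get_connecting_perspectives (perspections : List (Int × Int)) (length : Int) (out : List (Int × Int)) : Prop := out = get_connecting_perspectives_alt perspections length
instance (perspections : List (Int × Int)) (length : Int) (out : List (Int × Int)) : Decidable (Spec_get_connecting_perspectives perspections length out) := by unfold Spec_get_connecting_perspectives; infer_instance

-- ===== CLAIM (what is proved, stated in full; the proofs are below) =====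
def Claim_equal_get_connecting_perspectives : Prop := ∀ (perspections : List (Int × Int)) (length : Int), Dom_get_connecting_perspectives perspections length → Spec_get_connecting_perspectives perspections length (get_connecting_perspectives perspections length)

-- ===== LEMMAS AND PROOFS =====

-- successors of i (A's `end` list) and predecessors of i (A's `start` list)
def pvEndsOf (l : List (Int × Int)) (i : Int) : List Int :=
  (l.filter (fun p => p.1 == i)).map Prod.snd
def pvStartsOf (l : List (Int × Int)) (i : Int) : List Int :=
  (l.filter (fun p => !(p.1 == i) && (p.2 == i))).map Prod.fst

theorem pvA_collect (l : List (Int × Int)) (i : Int) (s0 e0 : List Int) :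
    l.foldl (fun (se : List Int × List Int) perspective =>
        if perspective.1 == i then (se.1, se.2 ++ [perspective.2])
        else if perspective.2 == i then (se.1 ++ [perspective.1], se.2)
        else se) (s0, e0)
      = (s0 ++ pvStartsOf l i, e0 ++ pvEndsOf l i) := by
  induction l generalizing s0 e0 with
  | nil => simp [pvStartsOf, pvEndsOf]
  | cons p t ih =>
    rw [List.foldl_cons]
    by_cases h1 : p.1 = i
    · rw [if_pos (by simp [h1]), ih]
      simp [pvStartsOf, pvEndsOf, h1]
    · by_cases h2 : p.2 = i
      · rw [if_neg (by simp [h1]), if_pos (by simp [h2]), ih]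
        simp [pvStartsOf, pvEndsOf, h1, h2]
      · rw [if_neg (by simp [h1]), if_neg (by simp [h2]), ih]
        simp [pvStartsOf, pvEndsOf, h1, h2]

theorem pvB_ends (l : List (Int × Int)) (d : PySem.Dict Int (List Int)) (i : Int) :
    (l.foldl (fun d p => d.modify p.1 [] (fun l => l ++ [p.2])) d).getD i []
      = d.getD i [] ++ pvEndsOf l i := by
  induction l generalizing d with
  | nil => simp [pvEndsOf]
  | cons p t ih =>
    rw [List.foldl_cons, ih]
    by_cases h : i = p.1
    · subst h
      rw [PySem.Dict.getD_modify_self]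
      simp [pvEndsOf]
    · rw [PySem.Dict.getD_modify_of_ne _ _ _ h]
      have h' : ¬ p.1 = i := fun hc => h hc.symm
      simp [pvEndsOf, h']

def pvStartsOfB (l : List (Int × Int)) (i : Int) : List Int :=
  (l.filter (fun p => !(p.1 == p.2) && (p.2 == i))).map Prod.fst

theorem pvB_starts (l : List (Int × Int)) (d : PySem.Dict Int (List Int)) (i : Int) :
    (l.foldl (fun d p => if p.1 ≠ p.2 then d.modify p.2 [] (fun l => l ++ [p.1]) else d) d).getD i []
      = d.getD i [] ++ pvStartsOfB l i := by
  induction l generalizing d with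
  | nil => simp [pvStartsOfB]
  | cons p t ih =>
    rw [List.foldl_cons]
    by_cases hne : p.1 = p.2
    · simp only [hne, ne_eq, not_true_eq_false, if_false, ih]
      simp [pvStartsOfB, hne]
    · simp only [ne_eq, hne, not_false_eq_true, if_true, ih]
      by_cases h : i = p.2
      · subst h
        rw [PySem.Dict.getD_modify_self]
        simp [pvStartsOfB, hne]
      · rw [PySem.Dict.getD_modify_of_ne _ _ _ h]
        have h' : ¬ p.2 = i := fun hc => h hc.symm
        simp [pvStartsOfB, h']

theorem pvStartsOfB_eq (l : List (Int × Int)) (i : Int) :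
    pvStartsOfB l i = pvStartsOf l i := by
  unfold pvStartsOfB pvStartsOf
  congr 1
  apply List.filter_congr
  intro p _
  by_cases h : p.2 = i
  · subst h; by_cases h1 : p.1 = p.2 <;> simp [h1]
  · have hb : (p.2 == i) = false := by simp [h]
    simp [hb]

-- ===== VERDICT (by name: the statement is the Claim_ definition above) =====
theorem get_connecting_perspectives_spec : Claim_equal_get_connecting_perspectives := by
  intro perspections length _
  unfold Spec_get_connecting_perspectives get_connecting_perspectives get_connecting_perspectives_alt
  simp only
  congr 1
  rw [PySem.List.foldl_prod_mk
    (fun (x : PySem.Dict Int (List Int)) (p : Int × Int) => x.modify p.1 [] (fun l => l ++ [p.2]))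
    (fun (x : PySem.Dict Int (List Int)) (p : Int × Int) =>
      if p.1 ≠ p.2 then x.modify p.2 [] (fun l => l ++ [p.1]) else x)
    perspections PySem.Dict.empty PySem.Dict.empty]
  apply List.foldl_ext
  intro acc i _
  rw [pvB_ends, pvB_starts, pvStartsOfB_eq, pvA_collect]
  simp only [List.nil_append]
  by_cases hs : pvStartsOf perspections i = []
  · simp [hs]
  · by_cases he : pvEndsOf perspections i = []
    · simp [he]  -- inner loop over [] makes the outer loop the identity
    · rw [if_pos (⟨by simpa [List.length_eq_zero_iff] using hs, by simpa [List.length_eq_zero_iff] using he⟩ : _ ∧ _)]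
      simp [PySem.Set.mem_ofList]
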